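-- pv_equiv track=rewrite | github.com/lifebit-ai/bin-scripts | gwas-sumstats-harmonisation-nf/convert_coeff.py | modify_header
-- ===== SOURCE A (Python) =====
-- def modify_header(header, stnd, beta2or, or2beta):
--     """Performs header additions when required.
--
--     Parameters
--     ----------
--     header : list
--         A list of strings from the original VCF. They still conserve
--         all new line and space characters from the original.
--     stnd : bool
--         Whether to apply standardisation of BETAS and SEs.
--     beta2or : bool
--         Whether to convert BETA to Odds Ratio.
--     or2beta : bool
--         Whether to convert Odds Ratio to Beta.
--     Return
--     ------
--     new_header : list
--         The strings to be printed to the VCF header.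
--     """
--     format_found = False
--     format_written = False
--     new_header = []
--     for e in header:
--         if e[:8] == '##FORMAT':
--             format_found = True
--         elif format_found and not format_written:
--             if or2beta:
--                 new_e = '##FORMAT=<ID=ES,Number=A,Type=Float,Description="Effect size estimate relative to the alternative allele">\n'
--                 e = new_e + e
--                 format_written = True
--             if beta2or:
--                 new_e = '##FORMAT=<ID=OR,Number=A,Type=Float,Description="Odds ratio of effect">\n'
--                 e = new_e + e
--                 format_written = True
--             if stnd:
--                 new_e = '##FORMAT=<ID=SES,Number=A,Type=Float,Description="Standardised effect size">\n'
--                 new_e2 = '##FORMAT=<ID=SSE,Number=A,Type=Float,Description="Standardised standard error of effect size">\n'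
--                 e = new_e + new_e2 + e
--                 format_written = True
--         new_header.append(e)
--     return new_header
-- ===== SOURCE B (Python) =====
-- ES = '##FORMAT=<ID=ES,Number=A,Type=Float,Description="Effect size estimate relative to the alternative allele">\n'
-- OR = '##FORMAT=<ID=OR,Number=A,Type=Float,Description="Odds ratio of effect">\n'
-- SES = '##FORMAT=<ID=SES,Number=A,Type=Float,Description="Standardised effect size">\n'
-- SSE = '##FORMAT=<ID=SSE,Number=A,Type=Float,Description="Standardised standard error of effect size">\n'
--
--
-- def _span(pred, xs):
--     """Longest prefix of xs satisfying pred, and the remainder."""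
--     for i, x in enumerate(xs):
--         if not pred(x):
--             return xs[:i], xs[i:]
--     return xs, []
--
--
-- def modify_header(header, stnd, beta2or, or2beta):
--     """Split the header into pre / FORMAT-run / tail segments and rebuild it
--     with the requested block glued onto the first tail line."""
--     block = (SES + SSE if stnd else '') + (OR if beta2or else '') + (ES if or2beta else '')
--     is_fmt = lambda e: e[:8] == '##FORMAT'
--     pre, rest = _span(lambda e: not is_fmt(e), header)
--     run, tail = _span(is_fmt, rest)
--     if not tail:
--         return pre + run
--     return pre + run + [block + tail[0]] + tail[1:]
-- ===== Notes on version B (the rewrite author's own statement) =====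
-- stated objective: simpler
-- what changed: B replaces A's single rebuild loop with two boolean flags by a segment decomposition: split the header into pre / FORMAT-run / tail with a span helper, build the insertion block once by conditional concatenation, and rebuild the list as pre + run + [block + tail[0]] + tail[1:].
import Mathlib
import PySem

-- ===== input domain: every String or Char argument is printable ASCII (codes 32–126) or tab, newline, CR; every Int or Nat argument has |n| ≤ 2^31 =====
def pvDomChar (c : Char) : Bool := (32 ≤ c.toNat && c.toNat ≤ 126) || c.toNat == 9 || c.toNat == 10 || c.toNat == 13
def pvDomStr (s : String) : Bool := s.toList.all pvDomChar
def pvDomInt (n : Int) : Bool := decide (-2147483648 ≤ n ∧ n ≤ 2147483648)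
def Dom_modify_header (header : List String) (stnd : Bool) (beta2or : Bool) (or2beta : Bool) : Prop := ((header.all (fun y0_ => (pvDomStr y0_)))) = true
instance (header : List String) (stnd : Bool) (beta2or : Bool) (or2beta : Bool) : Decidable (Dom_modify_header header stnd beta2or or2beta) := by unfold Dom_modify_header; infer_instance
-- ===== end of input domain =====

-- B replaces A's flag-juggling rebuild loop by a segment decomposition (pre / FORMAT-run /
-- tail via a span helper) and rebuilds the list by concatenation (simpler).

def pvES : String := "##FORMAT=<ID=ES,Number=A,Type=Float,Description=\"Effect size estimate relative to the alternative allele\">\n"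
def pvOR : String := "##FORMAT=<ID=OR,Number=A,Type=Float,Description=\"Odds ratio of effect\">\n"
def pvSES : String := "##FORMAT=<ID=SES,Number=A,Type=Float,Description=\"Standardised effect size\">\n"
def pvSSE : String := "##FORMAT=<ID=SSE,Number=A,Type=Float,Description=\"Standardised standard error of effect size\">\n"

-- e[:8] == '##FORMAT'
def pvIsFmt (e : String) : Bool := PySem.Str.slice e none (some 8) == "##FORMAT"

-- ===== PORT A =====
-- A's for-loop over header with the two flags as state, appending to new_header
def pvGoA (stnd beta2or or2beta : Bool) (found written : Bool) : List String → List String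
  | [] => []
  | e :: rest =>
    if pvIsFmt e then
      e :: pvGoA stnd beta2or or2beta true written rest
    else if found && !written then
      let e1 := if or2beta then pvES ++ e else e
      let w1 := if or2beta then true else written
      let e2 := if beta2or then pvOR ++ e1 else e1
      let w2 := if beta2or then true else w1
      let e3 := if stnd then pvSES ++ pvSSE ++ e2 else e2
      let w3 := if stnd then true else w2
      e3 :: pvGoA stnd beta2or or2beta found w3 rest
    else
      e :: pvGoA stnd beta2or or2beta found written rest

def modify_header (header : List String) (stnd : Bool) (beta2or : Bool) (or2beta : Bool) : List String :=
  pvGoA stnd beta2or or2beta false false header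

-- ===== PORT B =====
-- Source B's _span: longest prefix satisfying pred, and the remainder
def pvSpan (p : String → Bool) : List String → List String × List String
  | [] => ([], [])
  | x :: xs => if p x then let r := pvSpan p xs; (x :: r.1, r.2) else ([], x :: xs)

def modify_header_alt (header : List String) (stnd : Bool) (beta2or : Bool) (or2beta : Bool) : List String :=
  let block := (if stnd then pvSES ++ pvSSE else "") ++ (if beta2or then pvOR else "") ++ (if or2beta then pvES else "")
  let s1 := pvSpan (fun e => !pvIsFmt e) header
  let s2 := pvSpan pvIsFmt s1.2
  match s2.2 with
  | [] => s1.1 ++ s2.1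
  | t :: ts => s1.1 ++ s2.1 ++ (block ++ t) :: ts

-- ===== PRECONDITION & SPEC =====
def Spec_modify_header (header : List String) (stnd : Bool) (beta2or : Bool) (or2beta : Bool) (out : List String) : Prop := out = modify_header_alt header stnd beta2or or2beta
instance (header : List String) (stnd : Bool) (beta2or : Bool) (or2beta : Bool) (out : List String) : Decidable (Spec_modify_header header stnd beta2or or2beta out) := by unfold Spec_modify_header; infer_instance

-- ===== CLAIM (what is proved, stated in full; the proofs are below) =====
def Claim_equal_modify_header : Prop := ∀ (header : List String) (stnd : Bool) (beta2or : Bool) (or2beta : Bool), Dom_modify_header header stnd beta2or or2beta → Spec_modify_header header stnd beta2or or2beta (modify_header header stnd beta2or or2beta)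

-- ===== LEMMAS AND PROOFS =====

-- proof-only helper: glue blk onto the head of tail after pre ++ run
def pvPatch (blk : String) (pre run : List String) : List String → List String
  | [] => pre ++ run
  | t :: ts => pre ++ run ++ (blk ++ t) :: ts

theorem pvSpan_eq (p : String → Bool) (xs : List String) :
    pvSpan p xs = (xs.takeWhile p, xs.dropWhile p) := by
  induction xs with
  | nil => rfl
  | cons x xs ih => by_cases h : p x = true <;> simp [pvSpan, List.takeWhile, List.dropWhile, h, ih]

-- once format_written is true, A's loop copies the rest unchanged
theorem pvGoA_written (stnd beta2or or2beta : Bool) :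
    ∀ (rest : List String) (found : Bool),
      pvGoA stnd beta2or or2beta found true rest = rest := by
  intro rest
  induction rest with
  | nil => intro found; rfl
  | cons e rest ih =>
    intro found
    by_cases hf : pvIsFmt e = true <;> simp [pvGoA, hf, ih]

-- with no flag set, A's loop is the identity
theorem pvGoA_noflags :
    ∀ (rest : List String) (found written : Bool),
      pvGoA false false false found written rest = rest := by
  intro rest
  induction rest with
  | nil => intro found written; rfl
  | cons e rest ih =>
    intro found written
    by_cases hf : pvIsFmt e = true <;> simp [pvGoA, hf, ih]

-- after a FORMAT line was seen, with at least one flag set, A's loop glues the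
-- block onto the first non-FORMAT line and copies everything else
theorem pvGoA_found (stnd beta2or or2beta : Bool)
    (h : stnd || beta2or || or2beta = true) :
    ∀ (l : List String),
      pvGoA stnd beta2or or2beta true false l =
        pvPatch ((if stnd then pvSES ++ pvSSE else "") ++ (if beta2or then pvOR else "") ++
            (if or2beta then pvES else ""))
          [] (l.takeWhile pvIsFmt) (l.dropWhile pvIsFmt) := by
  intro l
  induction l with
  | nil => simp [pvGoA, pvPatch]
  | cons e l ih =>
    by_cases hf : pvIsFmt e = true
    · simp only [pvGoA, hf, ite_true, List.takeWhile_cons, List.dropWhile_cons]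
      rw [ih]
      cases hd : l.dropWhile pvIsFmt <;> simp [pvPatch, hd]
    · simp only [pvGoA, hf, Bool.false_eq_true, ite_false, List.takeWhile_cons,
        List.dropWhile_cons, Bool.not_false, Bool.and_true, ite_true]
      cases stnd <;> cases beta2or <;> cases or2beta <;>
        simp_all [pvGoA_written, pvPatch, String.append_assoc]

-- before any FORMAT line is seen, A's loop copies the non-FORMAT prefix
theorem pvGoA_start (stnd beta2or or2beta : Bool)
    (h : stnd || beta2or || or2beta = true) :
    ∀ (l : List String),
      pvGoA stnd beta2or or2beta false false l =
        pvPatch ((if stnd then pvSES ++ pvSSE else "") ++ (if beta2or then pvOR else "") ++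
            (if or2beta then pvES else ""))
          (l.takeWhile (fun e => !pvIsFmt e))
          ((l.dropWhile (fun e => !pvIsFmt e)).takeWhile pvIsFmt)
          ((l.dropWhile (fun e => !pvIsFmt e)).dropWhile pvIsFmt) := by
  intro l
  induction l with
  | nil => simp [pvGoA, pvPatch]
  | cons e l ih =>
    by_cases hf : pvIsFmt e = true
    · simp only [pvGoA, hf, ite_true, List.takeWhile_cons, List.dropWhile_cons,
        Bool.not_true, Bool.false_eq_true, ite_false]
      rw [pvGoA_found stnd beta2or or2beta h]
      cases hd : l.dropWhile pvIsFmt <;> simp [pvPatch, hd]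
    · simp only [pvGoA, hf, Bool.false_eq_true, ite_false, Bool.false_and,
        List.takeWhile_cons, List.dropWhile_cons, Bool.not_false, ite_true]
      rw [ih]
      cases hd : (l.dropWhile (fun e => !pvIsFmt e)).dropWhile pvIsFmt <;> simp [pvPatch, hd]

-- ===== VERDICT (by name: the statement is the Claim_ definition above) =====
theorem modify_header_spec : Claim_equal_modify_header := by
  intro header stnd beta2or or2beta _
  unfold Spec_modify_header modify_header modify_header_alt
  simp only [pvSpan_eq]
  by_cases h : stnd || beta2or || or2beta = true
  · rw [pvGoA_start stnd beta2or or2beta h header]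
    cases hd : (header.dropWhile (fun e => !pvIsFmt e)).dropWhile pvIsFmt <;>
      simp [pvPatch, hd]
  · have hs : stnd = false := by revert h; cases stnd <;> simp
    have hbb : beta2or = false := by revert h; cases beta2or <;> simp_all
    have ho : or2beta = false := by revert h; cases or2beta <;> simp_all
    subst hs hbb ho
    rw [pvGoA_noflags header false false]
    cases hd : (header.dropWhile (fun e => !pvIsFmt e)).dropWhile pvIsFmt with
    | nil =>
      have h2 : (header.dropWhile (fun e => !pvIsFmt e)).takeWhile pvIsFmt =
          header.dropWhile (fun e => !pvIsFmt e) := by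
        have h3 := List.takeWhile_append_dropWhile (p := pvIsFmt)
          (l := header.dropWhile (fun e => !pvIsFmt e))
        rw [hd, List.append_nil] at h3
        exact h3
      rw [h2, List.takeWhile_append_dropWhile]
    | cons t ts =>
      simp only [Bool.false_eq_true, ite_false]
      rw [List.append_assoc]
      have hr := List.takeWhile_append_dropWhile (p := pvIsFmt)
        (l := header.dropWhile (fun e => !pvIsFmt e))
      rw [hd] at hr
      calc header
          = header.takeWhile (fun e => !pvIsFmt e) ++ header.dropWhile (fun e => !pvIsFmt e) :=
            (List.takeWhile_append_dropWhile).symm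
        _ = header.takeWhile (fun e => !pvIsFmt e) ++
              ((header.dropWhile (fun e => !pvIsFmt e)).takeWhile pvIsFmt ++ t :: ts) := by
            rw [hr]
        _ = header.takeWhile (fun e => !pvIsFmt e) ++
              ((header.dropWhile (fun e => !pvIsFmt e)).takeWhile pvIsFmt ++
                (("" ++ "" ++ "" ++ t) :: ts)) := by simp
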